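-- pv_equiv track=rewrite | github.com/cloudpetticoats/DROO | utils.py | combine_allocation
-- ===== SOURCE A (Python) =====
-- def combine_allocation(x, a, m):
--     result = [x]
--     p = 0
--     for i in m:
--         if i == 0:
--             result.append(0)
--         else:
--             result.append(a[p])
--             p += 1
--     return result
-- ===== SOURCE B (Python) =====
-- def combine_allocation(x, a, m):
--     ms = list(m)
--     j = sum(1 for v in ms if v != 0)
--     out = []
--     for v in reversed(ms):
--         if v != 0:
--             j -= 1
--             out.append(a[j])
--         else:
--             out.append(0)
--     out.append(x)
--     out.reverse()
--     return out
-- ===== Notes on version B (the rewrite author's own statement) =====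
-- stated objective: alternative
-- what changed: B traverses the mask in reverse, drawing allocation values from a with a descending cursor initialised to the nonzero count, building the output back-to-front and reversing once at the end, instead of A's forward scan that appends while advancing an ascending cursor.
import Mathlib
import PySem

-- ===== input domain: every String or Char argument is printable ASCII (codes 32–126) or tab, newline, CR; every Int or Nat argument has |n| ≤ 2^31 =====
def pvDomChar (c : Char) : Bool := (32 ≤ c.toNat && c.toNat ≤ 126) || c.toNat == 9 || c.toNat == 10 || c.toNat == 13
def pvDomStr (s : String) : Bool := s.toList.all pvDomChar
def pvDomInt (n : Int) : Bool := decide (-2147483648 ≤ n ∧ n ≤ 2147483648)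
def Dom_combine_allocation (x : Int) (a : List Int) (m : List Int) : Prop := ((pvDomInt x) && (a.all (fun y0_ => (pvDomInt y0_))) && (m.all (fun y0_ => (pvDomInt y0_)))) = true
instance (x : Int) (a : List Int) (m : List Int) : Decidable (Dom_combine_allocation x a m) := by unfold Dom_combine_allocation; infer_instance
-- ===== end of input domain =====

-- B builds the result back-to-front: a reversed scan of the mask with a descending cursor
-- into a (initialised to the nonzero count), reversed once at the end; same cost as A's
-- forward append-with-ascending-cursor scan. (objective: alternative)

-- ===== PORT A =====
-- single forward scan over m, appending 0 or a[p] and advancing the cursor p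
def combine_allocation (x : Int) (a : List Int) (m : List Int) : List Int :=
  (m.foldl (fun (st : List Int × Nat) i =>
      if i = 0 then (st.1 ++ [(0 : Int)], st.2)
      else (st.1 ++ [a.getD st.2 0], st.2 + 1))   -- a[p]; in range under Pre_
    ([x], 0)).1

-- ===== PORT B =====
-- j = nonzero count; reversed scan: nonzero → j -= 1; append a[j]; zero → append 0;
-- then append x and reverse the whole accumulator
def combine_allocation_alt (x : Int) (a : List Int) (m : List Int) : List Int :=
  let j := m.countP (fun v => v != 0)
  let st := m.reverse.foldl (fun (st : List Int × Nat) v =>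
      if v != 0 then (st.1 ++ [a.getD (st.2 - 1) 0], st.2 - 1)   -- a[j]; in range under Pre_
      else (st.1 ++ [(0 : Int)], st.2)) ([], j)
  (st.1 ++ [x]).reverse

-- ===== PRECONDITION & SPEC =====
-- Pre_ excludes exactly the inputs where both Pythons raise IndexError: more nonzero mask
-- entries than allocation values.
def Pre_combine_allocation (x : Int) (a : List Int) (m : List Int) : Prop :=
  m.countP (fun i => i != 0) ≤ a.length
instance (x : Int) (a : List Int) (m : List Int) : Decidable (Pre_combine_allocation x a m) := by unfold Pre_combine_allocation; infer_instance
def pvWitness_combine_allocation : Int × List Int × List Int := (5, [7, 8], [0, 1, 1, 0])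

def Spec_combine_allocation (x : Int) (a : List Int) (m : List Int) (out : List Int) : Prop := out = combine_allocation_alt x a m
instance (x : Int) (a : List Int) (m : List Int) (out : List Int) : Decidable (Spec_combine_allocation x a m out) := by unfold Spec_combine_allocation; infer_instance

-- ===== CLAIM (what is proved, stated in full; the proofs are below) =====
def Claim_equal_combine_allocation : Prop := ∀ (x : Int) (a : List Int) (m : List Int), Dom_combine_allocation x a m → Pre_combine_allocation x a m → Spec_combine_allocation x a m (combine_allocation x a m)

-- ===== LEMMAS AND PROOFS =====

-- reference recursion both sides are reduced to: the tail of the result after the head x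
def pvTail (a : List Int) : List Int → Nat → List Int
  | [], _ => []
  | i :: ms, p => if i = 0 then 0 :: pvTail a ms p else a.getD p 0 :: pvTail a ms (p + 1)

-- A's fold appends exactly pvTail
theorem pvA_char (a : List Int) : ∀ (m res : List Int) (p : Nat),
    (m.foldl (fun (st : List Int × Nat) i =>
        if i = 0 then (st.1 ++ [(0 : Int)], st.2)
        else (st.1 ++ [a.getD st.2 0], st.2 + 1)) (res, p)).1 = res ++ pvTail a m p := by
  intro m
  induction m with
  | nil => intro res p; simp [pvTail]
  | cons i ms ih =>
    intro res p
    by_cases h : i = 0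
    · simp only [List.foldl_cons, if_pos h]
      rw [ih]
      simp [pvTail, h, List.append_assoc]
    · simp only [List.foldl_cons, if_neg h]
      rw [ih]
      simp [pvTail, h, List.append_assoc]

-- B's reversed fold, started at p plus the nonzero count, produces pvTail reversed and
-- leaves the cursor back at p
theorem pvB_char (a : List Int) : ∀ (m : List Int) (p : Nat),
    m.reverse.foldl (fun (st : List Int × Nat) v =>
        if v != 0 then (st.1 ++ [a.getD (st.2 - 1) 0], st.2 - 1)
        else (st.1 ++ [(0 : Int)], st.2)) ([], p + m.countP (fun v => v != 0))
      = ((pvTail a m p).reverse, p) := by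
  intro m
  induction m with
  | nil => intro p; simp [pvTail]
  | cons i ms ih =>
    intro p
    rw [List.reverse_cons, List.foldl_append]
    by_cases h : i = 0
    · have hc : (i :: ms).countP (fun v => v != 0) = ms.countP (fun v => v != 0) := by
        simp [List.countP_cons, h]
      rw [hc, ih p]
      simp [pvTail, h]
    · have hc : p + (i :: ms).countP (fun v => v != 0)
          = (p + 1) + ms.countP (fun v => v != 0) := by
        simp [List.countP_cons, h]; omega
      rw [hc, ih (p + 1)]
      simp [pvTail, h]

-- ===== VERDICT (by name: the statement is the Claim_ definition above) =====
theorem combine_allocation_spec : Claim_equal_combine_allocation := by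
  intro x a m _ _
  show combine_allocation x a m = combine_allocation_alt x a m
  rw [combine_allocation, combine_allocation_alt, pvA_char]
  show x :: pvTail a m 0
      = ((m.reverse.foldl _ ([], m.countP (fun v => v != 0))).1 ++ [x]).reverse
  rw [show m.countP (fun v => v != 0) = 0 + m.countP (fun v => v != 0) by omega,
    pvB_char a m 0]
  simp
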